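-- pv_equiv track=rewrite | github.com/Djrocks2105/VLWF-PerspectiveTransform | find_parallel_lines.py | findparallel
-- ===== SOURCE A (Python) =====
-- def findparallel(lines):
--     lines1 = []
--     for i in range(len(lines)):
--         for j in range(len(lines)):
--             if (i == j):continue
--             if (abs(lines[i][1] - lines[j][1]) == 0):
--                  #You've found a parallel line!
--                  lines1.append((i,j))
--     return lines1
-- ===== SOURCE B (Python) =====
-- def findparallel(lines):
--     groups = {}
--     for k, line in enumerate(lines):
--         groups.setdefault(line[1], []).append(k)
--     out = []
--     for i, line in enumerate(lines):
--         for j in groups[line[1]]: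
--             if j != i:
--                 out.append((i, j))
--     return out
-- ===== Notes on version B (the rewrite author's own statement) =====
-- stated objective: faster
-- what changed: Replaced the all-pairs double scan with a one-pass dict grouping indices by angle lines[k][1], then emitting (i,j) pairs per group, removing the inner O(n) scan.
import Mathlib
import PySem

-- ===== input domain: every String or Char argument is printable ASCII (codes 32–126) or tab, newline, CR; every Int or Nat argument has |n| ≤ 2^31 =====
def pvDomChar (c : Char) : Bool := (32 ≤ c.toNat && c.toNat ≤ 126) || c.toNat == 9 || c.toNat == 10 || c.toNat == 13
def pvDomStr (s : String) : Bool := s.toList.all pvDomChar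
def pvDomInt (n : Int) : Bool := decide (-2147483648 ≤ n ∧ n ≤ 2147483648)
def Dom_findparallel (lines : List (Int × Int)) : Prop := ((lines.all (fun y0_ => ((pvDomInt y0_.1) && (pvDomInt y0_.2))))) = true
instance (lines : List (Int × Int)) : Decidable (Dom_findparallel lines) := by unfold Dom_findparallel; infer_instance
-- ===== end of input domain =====

-- B groups indices by angle (lines[k][1]) in one dict pass and emits pairs per angle group,
-- instead of A's all-pairs double scan (objective: faster).

-- ===== PORT A =====
def findparallel (lines : List (Int × Int)) : List (Int × Int) :=
  (PySem.List.pyRange 0 (PySem.List.len lines) 1).foldl (fun lines1 i =>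
    (PySem.List.pyRange 0 (PySem.List.len lines) 1).foldl (fun lines1 j =>
      if i == j then lines1
      else if |(PySem.List.pyGetD lines i (0, 0)).2 - (PySem.List.pyGetD lines j (0, 0)).2| == 0 then
        lines1 ++ [(i, j)]
      else lines1) lines1) []

-- ===== PORT B =====
-- groups.setdefault(line[1], []).append(k) is Dict.modify line[1] [] (· ++ [k])
def pvGroups (lines : List (Int × Int)) : PySem.Dict Int (List Int) :=
  (PySem.List.enumerate lines).foldl (fun g p => g.modify p.2.2 [] (· ++ [p.1])) PySem.Dict.empty

def findparallel_alt (lines : List (Int × Int)) : List (Int × Int) :=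
  (PySem.List.enumerate lines).foldl (fun out p =>
    ((pvGroups lines).getD p.2.2 []).foldl
      (fun out j => if j ≠ p.1 then out ++ [(p.1, j)] else out) out) []

-- ===== PRECONDITION & SPEC =====
def Spec_findparallel (lines : List (Int × Int)) (out : List (Int × Int)) : Prop := out = findparallel_alt lines
instance (lines : List (Int × Int)) (out : List (Int × Int)) : Decidable (Spec_findparallel lines out) := by unfold Spec_findparallel; infer_instance

-- ===== CLAIM (what is proved, stated in full; the proofs are below) =====
def Claim_equal_findparallel : Prop := ∀ (lines : List (Int × Int)), Dom_findparallel lines → Spec_findparallel lines (findparallel lines)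

-- ===== LEMMAS AND PROOFS =====

-- the common canonical form both programs reduce to: for each i, all j with equal angle and j ≠ i
def pvPairsFor (lines : List (Int × Int)) (i : Int) : List (Int × Int) :=
  ((PySem.List.pyRange 0 (PySem.List.len lines) 1).filter
      (fun j => decide (j ≠ i) &&
        ((PySem.List.pyGetD lines j (0, 0)).2 == (PySem.List.pyGetD lines i (0, 0)).2))).map
    (fun j => (i, j))

lemma key_groups (lines : List (Int × Int)) (a : Int) :
    (pvGroups lines).getD a []
    = (PySem.List.pyRange 0 (PySem.List.len lines) 1).filter
        (fun j => (PySem.List.pyGetD lines j (0,0)).2 == a) := by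
  have h1 : pvGroups lines
      = ((PySem.List.enumerate lines).map (fun p => (p.2.2, p.1))).foldl
          (fun d q => d.modify q.1 [] (· ++ [q.2])) PySem.Dict.empty := by
    unfold pvGroups; rw [List.foldl_map]
  rw [h1, PySem.Dict.getD_foldl_modify_append, PySem.Dict.getD_empty]
  rw [PySem.List.enumerate_eq_map_pyRange lines ((0:Int),(0:Int))]
  simp [List.filter_map, Function.comp_def]

lemma A_eq (lines : List (Int × Int)) :
    findparallel lines
    = (PySem.List.pyRange 0 (PySem.List.len lines) 1).flatMap (pvPairsFor lines) := by
  unfold findparallel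
  rw [PySem.List.foldl_congr_mem _ _
      (fun acc i => acc ++ pvPairsFor lines i) _ ?_]
  · rw [PySem.List.foldl_append_eq_flatMap]; simp
  · intro acc i _
    rw [PySem.List.foldl_congr_mem _ _
        (fun acc j => if (decide (j ≠ i) &&
          ((PySem.List.pyGetD lines j (0,0)).2 == (PySem.List.pyGetD lines i (0,0)).2)) = true
          then acc ++ [(i, j)] else acc) _ ?_]
    · rw [PySem.List.foldl_if_eq_foldl_filter, PySem.List.foldl_append_singleton_eq_map]
      rfl
    · intro acc2 j _
      by_cases h : i = j
      · simp [h]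
      · by_cases h2 : (PySem.List.pyGetD lines i (0,0)).2 = (PySem.List.pyGetD lines j (0,0)).2
        · simp [h, h2, Ne.symm h]
        · have h3 : (PySem.List.pyGetD lines j (0,0)).2 ≠ (PySem.List.pyGetD lines i (0,0)).2 :=
            fun e => h2 e.symm
          simp [h, h3]
          omega

lemma B_eq (lines : List (Int × Int)) :
    findparallel_alt lines
    = (PySem.List.pyRange 0 (PySem.List.len lines) 1).flatMap (pvPairsFor lines) := by
  unfold findparallel_alt
  simp only [key_groups]
  rw [PySem.List.enumerate_eq_map_pyRange lines ((0:Int),(0:Int)), List.foldl_map]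
  rw [PySem.List.foldl_congr_mem _ _
      (fun acc i => acc ++ pvPairsFor lines i) _ ?_]
  · rw [PySem.List.foldl_append_eq_flatMap]; simp
  · intro acc i _
    rw [PySem.List.foldl_ite_eq_foldl_filter (fun j => j ≠ i)
        (fun out j => out ++ [(i, j)]), List.filter_filter,
        PySem.List.foldl_append_singleton_eq_map]
    rfl

-- ===== VERDICT (by name: the statement is the Claim_ definition above) =====
theorem findparallel_spec : Claim_equal_findparallel := by
  intro lines _
  unfold Spec_findparallel
  rw [A_eq, B_eq]
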